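-- pv_equiv track=rewrite | github.com/wfoschiera/AoC | 2023/day_11.py | expanded_distance
-- ===== SOURCE A (Python) =====
-- def expanded_distance(x1, y1, x2, y2, empty_rows, empty_cols, factor):
--     dx = abs(x1 - x2)
--     dy = abs(y1 - y2)
--     start_x = min(x1, x2)
--     start_y = min(y1, y2)
--
--     stop_x = start_x + dx
--     stop_y = start_y + dy
--
--     range_cols = set(range(start_x, stop_x + 1))
--     range_rows = set(range(start_y, stop_y + 1))
--
--     x_dim = range_cols.intersection(empty_cols)
--     y_dim = range_rows.intersection(empty_rows)
--
--     dx += sum([factor for exp in x_dim])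
--     dy += sum([factor for exp in y_dim])
--
--     return dx + dy
-- ===== SOURCE B (Python) =====
-- def expanded_distance(x1, y1, x2, y2, empty_rows, empty_cols, factor):
--     lo_x, hi_x = (x1, x2) if x1 <= x2 else (x2, x1)
--     lo_y, hi_y = (y1, y2) if y1 <= y2 else (y2, y1)
--     cx = len({c for c in empty_cols if lo_x <= c <= hi_x})
--     cy = len({r for r in empty_rows if lo_y <= r <= hi_y})
--     return (hi_x - lo_x) + (hi_y - lo_y) + factor * (cx + cy)
-- ===== Notes on version B (the rewrite author's own statement) =====
-- stated objective: alternative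
-- what changed: Instead of materialising the whole coordinate range as a set and intersecting it with the empty lists, B scans each empty list once and counts its distinct entries inside [min, max], so no range set is ever built.
import Mathlib
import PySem

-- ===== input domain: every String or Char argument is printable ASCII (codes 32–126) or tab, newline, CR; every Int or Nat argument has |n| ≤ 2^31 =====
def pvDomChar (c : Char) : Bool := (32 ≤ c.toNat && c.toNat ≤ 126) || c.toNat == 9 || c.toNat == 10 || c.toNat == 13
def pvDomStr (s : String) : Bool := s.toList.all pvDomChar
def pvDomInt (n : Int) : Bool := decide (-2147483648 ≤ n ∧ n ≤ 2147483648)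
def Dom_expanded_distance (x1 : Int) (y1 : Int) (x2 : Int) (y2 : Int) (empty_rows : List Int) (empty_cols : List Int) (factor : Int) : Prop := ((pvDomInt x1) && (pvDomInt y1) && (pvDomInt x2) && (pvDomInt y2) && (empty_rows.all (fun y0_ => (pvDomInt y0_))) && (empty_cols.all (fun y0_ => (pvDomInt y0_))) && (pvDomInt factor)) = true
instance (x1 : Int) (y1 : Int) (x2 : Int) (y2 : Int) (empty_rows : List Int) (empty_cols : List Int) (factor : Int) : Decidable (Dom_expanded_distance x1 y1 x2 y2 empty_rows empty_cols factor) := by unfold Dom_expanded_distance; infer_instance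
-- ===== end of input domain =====

-- B replaces A's materialised range-set intersection by a single scan of each empty list
-- counting its distinct entries inside [min, max] (objective: alternative — no range set is built).

-- ===== PORT A =====
def expanded_distance (x1 : Int) (y1 : Int) (x2 : Int) (y2 : Int) (empty_rows : List Int) (empty_cols : List Int) (factor : Int) : Int :=
  let dx := |x1 - x2|
  let dy := |y1 - y2|
  let start_x := min x1 x2
  let start_y := min y1 y2
  let stop_x := start_x + dx
  let stop_y := start_y + dy
  -- set(range(a, b)): a range has no duplicates, so set() is the identity on it
  -- (PySem.Set.ofList_eq_self_of_nodup, PySem.List.nodup_pyRange_one) — ported as the range itself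
  let range_cols : PySem.Set Int := PySem.List.pyRange start_x (stop_x + 1) 1
  let range_rows : PySem.Set Int := PySem.List.pyRange start_y (stop_y + 1) 1
  let x_dim := PySem.Set.inter range_cols empty_cols
  let y_dim := PySem.Set.inter range_rows empty_rows
  let dx := dx + (x_dim.map (fun _ => factor)).sum
  let dy := dy + (y_dim.map (fun _ => factor)).sum
  dx + dy

-- ===== PORT B =====
def expanded_distance_alt (x1 : Int) (y1 : Int) (x2 : Int) (y2 : Int) (empty_rows : List Int) (empty_cols : List Int) (factor : Int) : Int :=
  let lo_x := if x1 ≤ x2 then x1 else x2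
  let hi_x := if x1 ≤ x2 then x2 else x1
  let lo_y := if y1 ≤ y2 then y1 else y2
  let hi_y := if y1 ≤ y2 then y2 else y1
  let cx : Int := (PySem.Set.ofList (empty_cols.filter (fun c => decide (lo_x ≤ c) && decide (c ≤ hi_x)))).length
  let cy : Int := (PySem.Set.ofList (empty_rows.filter (fun r => decide (lo_y ≤ r) && decide (r ≤ hi_y)))).length
  (hi_x - lo_x) + (hi_y - lo_y) + factor * (cx + cy)

-- ===== PRECONDITION & SPEC =====
def Spec_expanded_distance (x1 : Int) (y1 : Int) (x2 : Int) (y2 : Int) (empty_rows : List Int) (empty_cols : List Int) (factor : Int) (out : Int) : Prop := out = expanded_distance_alt x1 y1 x2 y2 empty_rows empty_cols factor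
instance (x1 : Int) (y1 : Int) (x2 : Int) (y2 : Int) (empty_rows : List Int) (empty_cols : List Int) (factor : Int) (out : Int) : Decidable (Spec_expanded_distance x1 y1 x2 y2 empty_rows empty_cols factor out) := by unfold Spec_expanded_distance; infer_instance

-- ===== CLAIM (what is proved, stated in full; the proofs are below) =====
def Claim_equal_expanded_distance : Prop := ∀ (x1 : Int) (y1 : Int) (x2 : Int) (y2 : Int) (empty_rows : List Int) (empty_cols : List Int) (factor : Int), Dom_expanded_distance x1 y1 x2 y2 empty_rows empty_cols factor → Spec_expanded_distance x1 y1 x2 y2 empty_rows empty_cols factor (expanded_distance x1 y1 x2 y2 empty_rows empty_cols factor)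

-- ===== LEMMAS AND PROOFS =====

-- the intersection of set(range(lo, hi+1)) with l has as many elements as the distinct
-- in-range elements of l
theorem pv_len_eq (lo hi : Int) (l : List Int) :
    (PySem.Set.inter (PySem.List.pyRange lo (hi + 1) 1) l).length
      = (PySem.Set.ofList (l.filter (fun c => decide (lo ≤ c) && decide (c ≤ hi)))).length := by
  apply List.Perm.length_eq
  rw [List.perm_ext_iff_of_nodup
        (PySem.Set.nodup_inter _ _ (PySem.List.nodup_pyRange_one _ _)) (PySem.Set.nodup_ofList _)]
  intro x
  simp only [PySem.Set.mem_inter, PySem.Set.mem_ofList, PySem.List.mem_pyRange_one,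
    List.mem_filter, decide_eq_true_eq, Bool.and_eq_true]
  constructor
  · rintro ⟨⟨h1, h2⟩, h3⟩; exact ⟨h3, h1, by omega⟩
  · rintro ⟨h3, h1, h2⟩; exact ⟨⟨h1, by omega⟩, h3⟩

theorem pv_sum_eq (lo hi : Int) (l : List Int) (factor : Int) :
    ((PySem.Set.inter (PySem.List.pyRange lo (hi + 1) 1) l).map
        (fun _ => factor)).sum
      = factor * ((PySem.Set.ofList (l.filter (fun c => decide (lo ≤ c) && decide (c ≤ hi)))).length : Int) := by
  rw [PySem.List.sum_map_const_int, pv_len_eq]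
  ring

-- one axis: A's "abs + range-set intersection" term equals B's "span + count" term
theorem pv_side (a b : Int) (l : List Int) (factor : Int) :
    |a - b| + ((PySem.Set.inter
        (PySem.List.pyRange (min a b) (min a b + |a - b| + 1) 1) l).map (fun _ => factor)).sum
      = ((if a ≤ b then b else a) - (if a ≤ b then a else b))
        + factor * ((PySem.Set.ofList (l.filter (fun c =>
            decide ((if a ≤ b then a else b) ≤ c) && decide (c ≤ (if a ≤ b then b else a))))).length : Int) := by
  by_cases h : a ≤ b
  · have h1 : |a - b| = b - a := by rw [abs_sub_comm]; exact abs_of_nonneg (by omega)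
    have h2 : min a b = a := min_eq_left h
    rw [if_pos h, if_pos h, h1, h2, (by ring : a + (b - a) + 1 = b + 1), pv_sum_eq]
  · have h1 : |a - b| = a - b := abs_of_nonneg (by omega)
    have h2 : min a b = b := min_eq_right (by omega)
    rw [if_neg h, if_neg h, h1, h2, (by ring : b + (a - b) + 1 = a + 1), pv_sum_eq]

-- ===== VERDICT (by name: the statement is the Claim_ definition above) =====
theorem expanded_distance_spec : Claim_equal_expanded_distance := by
  intro x1 y1 x2 y2 empty_rows empty_cols factor _
  unfold Spec_expanded_distance expanded_distance expanded_distance_alt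
  simp only []
  rw [pv_side x1 x2 empty_cols factor, pv_side y1 y2 empty_rows factor]
  ring
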